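-- pv_equiv track=rewrite | github.com/gvard/astrodata | src/astrodata/stars/transients.py | mk_transient_total_numbers
-- ===== SOURCE A (Python) =====
-- def mk_transient_total_numbers(total_dct):
--     """Make list of transient total numbers."""
--     total_lst = []
--     _sum = 0
--     for num in total_dct.values():
--         if _sum == 0:
--             _sum = num
--         else:
--             _sum += num
--         total_lst.append(_sum)
--     return total_lst
-- ===== SOURCE B (Python) =====
-- def mk_transient_total_numbers(total_dct):
--     """Make list of transient total numbers."""
--     values = list(total_dct.values())
--     return [sum(values[:i + 1]) for i in range(len(values))]
-- ===== Notes on version B (the rewrite author's own statement) =====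
-- stated objective: alternative
-- what changed: Replaces A's single-pass running accumulator (with its redundant _sum==0 branch) by recomputing each prefix total as sum(values[:i+1]) over a growing slice.
import Mathlib
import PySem

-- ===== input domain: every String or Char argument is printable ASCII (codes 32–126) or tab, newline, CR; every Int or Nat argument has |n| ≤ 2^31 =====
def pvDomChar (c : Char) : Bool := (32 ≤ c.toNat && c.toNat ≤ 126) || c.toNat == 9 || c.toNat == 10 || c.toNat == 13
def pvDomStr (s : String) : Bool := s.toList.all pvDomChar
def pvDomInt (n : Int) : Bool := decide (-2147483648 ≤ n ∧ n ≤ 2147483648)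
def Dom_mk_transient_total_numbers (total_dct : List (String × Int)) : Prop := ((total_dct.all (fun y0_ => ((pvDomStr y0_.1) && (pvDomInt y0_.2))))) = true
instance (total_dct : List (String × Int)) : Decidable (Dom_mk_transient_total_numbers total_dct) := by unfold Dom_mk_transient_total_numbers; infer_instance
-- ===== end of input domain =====

-- ===== PORT A =====
-- literal port of A: fold over the dict's values with state (total_lst, _sum), keeping the _sum == 0 branch
def mk_transient_total_numbers (total_dct : List (String × Int)) : List Int :=
  ((total_dct.map Prod.snd).foldl
    (fun (st : List Int × Int) (num : Int) =>
      let s := if st.2 = 0 then num else st.2 + num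
      (st.1 ++ [s], s))
    ([], 0)).1

-- ===== PORT B =====
-- B: each prefix total recomputed as sum(values[:i+1]) (Python sum = left fold from 0)
def mk_transient_total_numbers_alt (total_dct : List (String × Int)) : List Int :=
  let values := total_dct.map Prod.snd
  (List.range values.length).map (fun i => ((values.take (i + 1)).foldl (· + ·) 0))

-- ===== PRECONDITION & SPEC =====
def Spec_mk_transient_total_numbers (total_dct : List (String × Int)) (out : List Int) : Prop := out = mk_transient_total_numbers_alt total_dct
instance (total_dct : List (String × Int)) (out : List Int) : Decidable (Spec_mk_transient_total_numbers total_dct out) := by unfold Spec_mk_transient_total_numbers; infer_instance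

-- ===== CLAIM (what is proved, stated in full; the proofs are below) =====
def Claim_equal_mk_transient_total_numbers : Prop := ∀ (total_dct : List (String × Int)), Dom_mk_transient_total_numbers total_dct → Spec_mk_transient_total_numbers total_dct (mk_transient_total_numbers total_dct)

-- ===== LEMMAS AND PROOFS =====

-- A's fold with the s = 0 branch equals the plain running-sum fold (0 + num = num)
lemma foldA_eq_plain (l : List Int) (st : List Int × Int) :
    l.foldl (fun (st : List Int × Int) (num : Int) =>
        let s := if st.2 = 0 then num else st.2 + num
        (st.1 ++ [s], s)) st
    = l.foldl (fun (st : List Int × Int) (num : Int) => (st.1 ++ [st.2 + num], st.2 + num)) st := by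
  induction l generalizing st with
  | nil => rfl
  | cons v t ih =>
      simp only [List.foldl_cons]
      rw [ih]
      by_cases h : st.2 = 0 <;> simp [h]

lemma plain_fold_prefix (l : List Int) (acc : List Int) (s : Int) :
    (l.foldl (fun (st : List Int × Int) (num : Int) => (st.1 ++ [st.2 + num], st.2 + num)) (acc, s)).1
    = acc ++ (List.range l.length).map (fun i => (l.take (i + 1)).foldl (· + ·) s) := by
  induction l generalizing acc s with
  | nil => simp
  | cons v t ih =>
      simp only [List.foldl_cons, List.length_cons, List.range_succ_eq_map, List.map_cons,
        List.map_map]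
      rw [ih]
      simp [Function.comp, List.append_assoc]

-- ===== VERDICT (by name: the statement is the Claim_ definition above) =====
theorem mk_transient_total_numbers_spec : Claim_equal_mk_transient_total_numbers := by
  intro d _
  unfold Spec_mk_transient_total_numbers mk_transient_total_numbers mk_transient_total_numbers_alt
  rw [foldA_eq_plain, plain_fold_prefix]
  simp
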